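-- pv_equiv track=rewrite | github.com/KWY97/My_Algorithm | programmers/PCCP/모의고사_1회/01_외톨이_알파벳.py | solution
-- ===== SOURCE A (Python) =====
-- def solution(input_string):
--     count = {}
--     answer_list = []
--
--     for idx, char in enumerate(input_string):
--         if char not in count:
--             count[char] = [idx]
--         else:
--             count[char].append(idx)
--
--     for key, value in count.items():
--         if len(value) >= 2:
--             for i in range(len(value) - 1):
--                 if abs(value[i] - value[i+1]) > 1:
--                     answer_list.append(key)
--                     break
--
--     if not answer_list:
--         answer = 'N'
--     else:
--         answer = ''.join(sorted(answer_list))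
--
--     return answer
-- ===== SOURCE B (Python) =====
-- def solution(input_string):
--     last = {}
--     loners = set()
--     for idx, char in enumerate(input_string):
--         if char in last and idx - last[char] > 1:
--             loners.add(char)
--         last[char] = idx
--     if not loners:
--         return 'N'
--     return ''.join(sorted(loners))
-- ===== Notes on version B (the rewrite author's own statement) =====
-- stated objective: simpler
-- what changed: Single pass keeping only each character's most recent index plus a loner set, instead of building full per-character index lists and then re-scanning each list in a second nested loop.
import Mathlib
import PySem

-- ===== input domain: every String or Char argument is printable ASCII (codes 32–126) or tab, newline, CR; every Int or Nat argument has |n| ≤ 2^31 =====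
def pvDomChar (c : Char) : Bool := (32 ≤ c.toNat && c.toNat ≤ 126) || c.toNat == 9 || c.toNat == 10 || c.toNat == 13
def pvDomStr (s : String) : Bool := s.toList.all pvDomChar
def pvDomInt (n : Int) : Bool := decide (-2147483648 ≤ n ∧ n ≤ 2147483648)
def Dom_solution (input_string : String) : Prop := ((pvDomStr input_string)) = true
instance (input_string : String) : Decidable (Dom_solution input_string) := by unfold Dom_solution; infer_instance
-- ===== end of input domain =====

-- B replaces A's dict of full index lists + second nested scanning pass by one pass that keeps
-- only each character's last index and a loner set (simpler; same result).

-- ===== PORT A =====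
-- Inner `for i in range(len(value)-1): if abs(v[i]-v[i+1]) > 1: append(key); break` is ported as a
-- first-hit `any` over the same range guarding a single append (the break appends at most once).
-- Indices produced by the range are always in bounds, so pyGetD's default 0 is never used.
def solution (input_string : String) : String :=
  let count : PySem.Dict Char (List Int) :=
    (PySem.List.enumerate input_string.toList 0).foldl
      (fun d p =>
        if d.contains p.2 = false then d.insert p.2 [p.1]
        else d.modify p.2 [] (fun l => l ++ [p.1]))
      PySem.Dict.empty
  let answer_list : List Char :=
    count.items.foldl
      (fun acc kv =>
        if 2 ≤ kv.2.length then
          if (PySem.List.pyRange 0 ((kv.2.length : Int) - 1) 1).any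
               (fun i => 1 < ((PySem.List.pyGetD kv.2 i 0) - (PySem.List.pyGetD kv.2 (i + 1) 0)).natAbs) then
            acc ++ [kv.1]
          else acc
        else acc)
      []
  if answer_list = [] then "N"
  else String.ofList (PySem.List.sorted answer_list (fun x => x) false)

-- ===== PORT B =====
-- One pass: `last` maps each char to its most recent index, `loners` collects chars seen again
-- more than one position after their previous occurrence; then 'N' or the sorted loners.
def solution_alt (input_string : String) : String :=
  let st : PySem.Dict Char Int × PySem.Set Char :=
    (PySem.List.enumerate input_string.toList 0).foldl
      (fun s p =>
        (s.1.insert p.2 p.1,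
         if s.1.contains p.2 && decide (1 < p.1 - s.1.getD p.2 0) then PySem.Set.add s.2 p.2
         else s.2))
      (PySem.Dict.empty, PySem.Set.empty)
  if st.2 = [] then "N"
  else String.ofList (PySem.List.sorted st.2 (fun x => x) false)

-- ===== PRECONDITION & SPEC =====
def Spec_solution (input_string : String) (out : String) : Prop := out = solution_alt input_string
instance (input_string : String) (out : String) : Decidable (Spec_solution input_string out) := by unfold Spec_solution; infer_instance

-- ===== CLAIM (what is proved, stated in full; the proofs are below) =====
def Claim_equal_solution : Prop := ∀ (input_string : String), Dom_solution input_string → Spec_solution input_string (solution input_string)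

-- ===== LEMMAS AND PROOFS =====

-- positions (indices) at which character c occurs in the enumerated list l
def pvPos (c : Char) (l : List (Int × Char)) : List Int :=
  (l.filter (fun p => p.2 == c)).map (·.1)

-- "some adjacent pair of positions has (signed) gap > 1" — B's loner criterion, structurally
def pvGap : List Int → Bool
  | [] => false
  | [_] => false
  | a :: b :: t => decide (1 < b - a) || pvGap (b :: t)

-- gap between the last recorded position (if any) and a new index i
def pvGapLast (v : List Int) (i : Int) : Bool :=
  match v.getLast? with
  | none => false
  | some j => decide (1 < i - j)

theorem pvGap_append (v : List Int) (i : Int) :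
    pvGap (v ++ [i]) = (pvGap v || pvGapLast v i) := by
  induction v with
  | nil => simp [pvGap, pvGapLast]
  | cons a t ih =>
    cases t with
    | nil => simp [pvGap, pvGapLast]
    | cons b t' =>
      show (decide (1 < b - a) || pvGap (b :: (t' ++ [i]))) = _
      rw [show b :: (t' ++ [i]) = (b :: t') ++ [i] from rfl, ih]
      simp [pvGap, pvGapLast, List.getLast?_cons_cons, Bool.or_assoc]

theorem pvGap_iff_exists (v : List Int) :
    pvGap v = true ↔ ∃ k : Nat, k + 1 < v.length ∧ 1 < v.getD (k + 1) 0 - v.getD k 0 := by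
  induction v with
  | nil => simp [pvGap]
  | cons a t ih =>
    cases t with
    | nil => simp [pvGap]
    | cons b t' =>
      simp only [pvGap, Bool.or_eq_true, decide_eq_true_eq, ih]
      constructor
      · rintro (h | ⟨k, hk, hg⟩)
        · exact ⟨0, by simp, by simpa using h⟩
        · exact ⟨k + 1, by simpa using hk, by simpa using hg⟩
      · rintro ⟨k, hk, hg⟩
        cases k with
        | zero => left; simpa using hg
        | succ k => right; exact ⟨k, by simpa using hk, by simpa using hg⟩

theorem pvPos_append (c : Char) (l : List (Int × Char)) (p : Int × Char) :
    pvPos c (l ++ [p]) = pvPos c l ++ (if p.2 == c then [p.1] else []) := by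
  simp only [pvPos, List.filter_append, List.map_append]
  by_cases h : p.2 == c <;> simp [h]

-- B's fold state, abstracted over the processed prefix
def pvStB (l : List (Int × Char)) : PySem.Dict Char Int × PySem.Set Char :=
  l.foldl
    (fun s p =>
      (s.1.insert p.2 p.1,
       if s.1.contains p.2 && decide (1 < p.1 - s.1.getD p.2 0) then PySem.Set.add s.2 p.2
       else s.2))
    (PySem.Dict.empty, PySem.Set.empty)

theorem pvStB_invariant (l : List (Int × Char)) :
    (∀ c, (pvStB l).1.get? c = (pvPos c l).getLast?) ∧
    (∀ c, (c ∈ (pvStB l).2 ↔ pvGap (pvPos c l) = true)) ∧ (pvStB l).2.Nodup := by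
  induction l using List.reverseRecOn with
  | nil =>
    refine ⟨fun c => rfl, fun c => by simp [pvStB, pvPos, pvGap, PySem.Set.empty], by simp [pvStB, PySem.Set.empty]⟩
  | append_singleton l p ih =>
    obtain ⟨h1, h2, h3⟩ := ih
    have hst : pvStB (l ++ [p]) =
        ((pvStB l).1.insert p.2 p.1,
         if (pvStB l).1.contains p.2 && decide (1 < p.1 - (pvStB l).1.getD p.2 0) then
           PySem.Set.add (pvStB l).2 p.2
         else (pvStB l).2) := by
      simp [pvStB, List.foldl_append]
    have hcond : ((pvStB l).1.contains p.2 && decide (1 < p.1 - (pvStB l).1.getD p.2 0))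
        = pvGapLast (pvPos p.2 l) p.1 := by
      rw [PySem.Dict.contains_eq_isSome_get?, PySem.Dict.getD_eq_get?_getD, h1, pvGapLast]
      cases (pvPos p.2 l).getLast? <;> simp
    refine ⟨fun c => ?_, fun c => ?_, ?_⟩
    · rw [hst, pvPos_append]
      by_cases hc : c = p.2
      · subst hc
        simp [PySem.Dict.get?_insert_self]
      · have hne : (p.2 == c) = false := by simpa using fun h => hc h.symm
        simp only [hne, Bool.false_eq_true, if_false, List.append_nil]
        rw [PySem.Dict.get?_insert_of_ne _ _ hc, h1]
    · rw [hst, pvPos_append]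
      by_cases hc : c = p.2
      · subst hc
        simp only [BEq.rfl, if_true, pvGap_append, hcond]
        cases hgl : pvGapLast (pvPos p.2 l) p.1
        · simp only [Bool.false_eq_true, if_false, Bool.or_false]
          exact h2 p.2
        · simp only [if_true, Bool.or_true, iff_true]
          exact (PySem.Set.mem_add _ _ _).2 (Or.inr rfl)
      · have hne : (p.2 == c) = false := by simpa using fun h => hc h.symm
        simp only [hne, Bool.false_eq_true, if_false, List.append_nil]
        by_cases hcd : ((pvStB l).1.contains p.2 && decide (1 < p.1 - (pvStB l).1.getD p.2 0)) = true
        · simp only [hcd, if_true, PySem.Set.mem_add, hc, or_false]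
          exact h2 c
        · simp only [hcd]
          exact h2 c
    · rw [hst]
      by_cases hcd : ((pvStB l).1.contains p.2 && decide (1 < p.1 - (pvStB l).1.getD p.2 0)) = true
      · simp only [hcd, if_true]
        exact PySem.Set.nodup_add _ _ h3
      · simp only [hcd]
        exact h3

-- A's grouping fold (identical to the fold in `solution`)
def pvCnt (l : List (Int × Char)) : PySem.Dict Char (List Int) :=
  l.foldl
    (fun d p =>
      if d.contains p.2 = false then d.insert p.2 [p.1]
      else d.modify p.2 [] (fun v => v ++ [p.1]))
    PySem.Dict.empty

-- A's inner scan (identical to the `any` in `solution`)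
def pvAnyR (v : List Int) : Bool :=
  (PySem.List.pyRange 0 ((v.length : Int) - 1) 1).any
    (fun i => 1 < ((PySem.List.pyGetD v i 0) - (PySem.List.pyGetD v (i + 1) 0)).natAbs)

-- A's answer_list fold (identical to the fold in `solution`)
def pvAList (l : List (Int × Char)) : List Char :=
  (pvCnt l).items.foldl
    (fun acc kv =>
      if 2 ≤ kv.2.length then
        if pvAnyR kv.2 then acc ++ [kv.1] else acc
      else acc)
    []

theorem pvCnt_eq_modify (l : List (Int × Char)) :
    pvCnt l = l.foldl (fun d p => d.modify p.2 [] (fun v => v ++ [p.1])) PySem.Dict.empty := by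
  unfold pvCnt
  refine PySem.List.foldl_congr_mem l _ _ _ (fun d p _ => ?_)
  by_cases hc : d.contains p.2 = false
  · rw [if_pos hc]
    simp [PySem.Dict.modify, PySem.Dict.getD_of_not_contains d [] hc]
  · rw [if_neg hc]

theorem pvCnt_getD (l : List (Int × Char)) (c : Char) :
    (pvCnt l).getD c [] = pvPos c l := by
  rw [pvCnt_eq_modify,
    show l.foldl (fun d p => d.modify p.2 [] (fun v => v ++ [p.1])) PySem.Dict.empty
      = (l.map (fun p => (p.2, p.1))).foldl
          (fun d p => d.modify p.1 [] (fun v => v ++ [p.2])) PySem.Dict.empty from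
      (List.foldl_map (f := fun p : Int × Char => (p.2, p.1))
        (g := fun (d : PySem.Dict Char (List Int)) (p : Char × Int) =>
          d.modify p.1 [] fun v => v ++ [p.2])).symm,
    PySem.Dict.getD_foldl_modify_append, List.filter_map]
  simp [pvPos, List.map_map, Function.comp_def]

theorem pvCnt_keys (l : List (Int × Char)) :
    (pvCnt l).keys = PySem.Set.ofList (l.map (·.2)) := by
  rw [pvCnt_eq_modify,
    PySem.Dict.keys_foldl_modify_key (key := fun p : Int × Char => p.2)
      (f := fun _ p => fun v => v ++ [p.1])]
  rfl

theorem pvAList_eq (l : List (Int × Char)) :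
    pvAList l = ((pvCnt l).keys).filter
      (fun c => decide (2 ≤ (pvPos c l).length) && pvAnyR (pvPos c l)) := by
  have hnd : (pvCnt l).keys.Nodup := by
    rw [pvCnt_keys]; exact PySem.Set.nodup_ofList _
  unfold pvAList
  rw [PySem.List.foldl_congr_mem (pvCnt l).items _
        (fun acc kv =>
          if (decide (2 ≤ (kv.2 : List Int).length) && pvAnyR kv.2) = true
          then acc ++ [kv.1] else acc) []
        (fun acc kv _ => by by_cases h1 : 2 ≤ (kv.2 : List Int).length <;>
          by_cases h2 : pvAnyR kv.2 = true <;> simp [h1, h2]),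
    PySem.List.foldl_append_if, PySem.Dict.items_eq_map_keys (pvCnt l) hnd [],
    List.filter_map, List.map_map]
  simp only [List.nil_append]
  rw [show (Prod.fst ∘ fun k : Char => (k, (pvCnt l).getD k [])) = fun k => k from rfl,
    List.map_id_fun']
  simp only [id_eq]
  exact List.filter_congr (fun c _ => by rw [Function.comp_apply, pvCnt_getD])

theorem pvAnyR_gap (v : List Int) (hp : v.Pairwise (· < ·)) :
    (decide (2 ≤ v.length) && pvAnyR v) = pvGap v := by
  rw [Bool.eq_iff_iff]
  rw [Bool.and_eq_true, decide_eq_true_eq, pvGap_iff_exists]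
  have hlt : ∀ k : Nat, k + 1 < v.length → v.getD k 0 < v.getD (k + 1) 0 := fun k h2 => by
    rw [List.getD_eq_getElem v 0 (by omega), List.getD_eq_getElem v 0 h2]
    exact List.pairwise_iff_getElem.1 hp k (k + 1) (by omega) h2 (by omega)
  constructor
  · rintro ⟨hlen, hany⟩
    obtain ⟨i, hi, hgap⟩ := List.any_eq_true.1 hany
    obtain ⟨h0, hub⟩ := PySem.List.mem_pyRange_one.1 hi
    obtain ⟨k, rfl⟩ := Int.eq_ofNat_of_zero_le h0
    have hk : k + 1 < v.length := by omega
    rw [show ((k : Int) + 1) = ((k + 1 : Nat) : Int) by push_cast; ring,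
      PySem.List.pyGetD_natCast, PySem.List.pyGetD_natCast] at hgap
    have := hlt k hk
    exact ⟨k, hk, by simp only [decide_eq_true_eq] at hgap; omega⟩
  · rintro ⟨k, hk, hg⟩
    refine ⟨by omega, List.any_eq_true.2 ⟨(k : Int), PySem.List.mem_pyRange_one.2
      ⟨by positivity, by omega⟩, ?_⟩⟩
    rw [show ((k : Int) + 1) = ((k + 1 : Nat) : Int) by push_cast; ring,
      PySem.List.pyGetD_natCast, PySem.List.pyGetD_natCast]
    have := hlt k hk
    simp only [decide_eq_true_eq]
    omega

theorem pvPos_pairwise (s : List Char) (c : Char) :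
    (pvPos c (PySem.List.enumerate s 0)).Pairwise (· < ·) := by
  unfold pvPos
  exact List.pairwise_map.2 (List.Pairwise.filter _ (PySem.List.pairwise_lt_enumerate s 0))

theorem pvGap_mem (l : List (Int × Char)) (c : Char)
    (h : pvGap (pvPos c l) = true) : c ∈ PySem.Set.ofList (l.map (·.2)) := by
  obtain ⟨k, hk, -⟩ := (pvGap_iff_exists _).1 h
  have hne : l.filter (fun p => p.2 == c) ≠ [] := by
    intro h0
    rw [pvPos, h0] at hk
    simp at hk
  obtain ⟨p, hp⟩ := List.exists_mem_of_ne_nil _ hne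
  rw [PySem.Set.mem_ofList]
  exact List.mem_map.2 ⟨p, (List.mem_filter.1 hp).1, by
    simpa using (List.mem_filter.1 hp).2⟩

theorem pvMem_iff (s : List Char) (c : Char) :
    c ∈ pvAList (PySem.List.enumerate s 0) ↔ c ∈ (pvStB (PySem.List.enumerate s 0)).2 := by
  rw [pvAList_eq, List.mem_filter, pvCnt_keys,
    pvAnyR_gap _ (pvPos_pairwise s c), ((pvStB_invariant _).2.1 c)]
  exact ⟨fun h => h.2, fun h => ⟨pvGap_mem _ _ h, h⟩⟩

-- ===== VERDICT (by name: the statement is the Claim_ definition above) =====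
theorem solution_spec : Claim_equal_solution := by
  intro s _
  show solution s = solution_alt s
  have hA : solution s =
      (if pvAList (PySem.List.enumerate s.toList 0) = [] then "N"
       else String.ofList (PySem.List.sorted (pvAList (PySem.List.enumerate s.toList 0))
              (fun x => x) false)) := rfl
  have hB : solution_alt s =
      (if (pvStB (PySem.List.enumerate s.toList 0)).2 = [] then "N"
       else String.ofList (PySem.List.sorted ((pvStB (PySem.List.enumerate s.toList 0)).2)
              (fun x => x) false)) := rfl
  rw [hA, hB]
  have hndA : (pvAList (PySem.List.enumerate s.toList 0)).Nodup := by
    rw [pvAList_eq, pvCnt_keys]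
    exact (PySem.Set.nodup_ofList _).filter _
  have hperm := (List.perm_ext_iff_of_nodup hndA (pvStB_invariant _).2.2).2
    (pvMem_iff s.toList)
  have hnil : (pvAList (PySem.List.enumerate s.toList 0) = []) ↔
      ((pvStB (PySem.List.enumerate s.toList 0)).2 = []) := by
    constructor
    · intro h; rw [h] at hperm; exact hperm.symm.eq_nil
    · intro h; rw [h] at hperm; exact hperm.eq_nil
  by_cases h : pvAList (PySem.List.enumerate s.toList 0) = []
  · rw [if_pos h, if_pos (hnil.1 h)]
  · rw [if_neg h, if_neg (fun h2 => h (hnil.2 h2)),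
      PySem.List.sorted_eq_sorted_of_perm _ _ _ (fun _ _ h => h) hperm]
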